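-- pv_equiv track=rewrite | github.com/KisloTAooAnkit/Python-Programs | DP1/2140. Solving Questions With Brainpower.py | helper
-- ===== SOURCE A (Python) =====
-- def helper(questions,i,n,dp):
--     if i >= n:
--         return 0
--     if dp[i] != -1:
--         return dp[i]
--
--     pick = helper(questions,i+questions[i][1]+1,n,dp) + questions[i][0]
--     skip = helper(questions,i+1,n,dp)
--     dp[i] = max(pick,skip)
--     return dp[i]
-- ===== SOURCE B (Python) =====
-- def helper(questions, i, n, dp):
--     if i >= n:
--         return 0
--     for j in range(n - 1, i - 1, -1):
--         if dp[j] == -1: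
--             nxt = j + questions[j][1] + 1
--             pick = questions[j][0] + (dp[nxt] if nxt < n else 0)
--             skip = dp[j + 1] if j + 1 < n else 0
--             dp[j] = max(pick, skip)
--     return dp[i]
-- ===== Notes on version B (the rewrite author's own statement) =====
-- stated objective: alternative
-- what changed: Replaced A's top-down memoized recursion with an iterative bottom-up tabulation: one loop from n-1 down to i filling the uncached dp cells in place, then read dp[i]; no recursion at all.
-- outside the precondition, e.g. on helper([[1, 0], [2, 0]], -1, 2, [-1, -1]): A returns 5, B returns 2; on helper([[1, -2]], 0, 1, [-1]): A raises IndexError, B returns 0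
import Mathlib
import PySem

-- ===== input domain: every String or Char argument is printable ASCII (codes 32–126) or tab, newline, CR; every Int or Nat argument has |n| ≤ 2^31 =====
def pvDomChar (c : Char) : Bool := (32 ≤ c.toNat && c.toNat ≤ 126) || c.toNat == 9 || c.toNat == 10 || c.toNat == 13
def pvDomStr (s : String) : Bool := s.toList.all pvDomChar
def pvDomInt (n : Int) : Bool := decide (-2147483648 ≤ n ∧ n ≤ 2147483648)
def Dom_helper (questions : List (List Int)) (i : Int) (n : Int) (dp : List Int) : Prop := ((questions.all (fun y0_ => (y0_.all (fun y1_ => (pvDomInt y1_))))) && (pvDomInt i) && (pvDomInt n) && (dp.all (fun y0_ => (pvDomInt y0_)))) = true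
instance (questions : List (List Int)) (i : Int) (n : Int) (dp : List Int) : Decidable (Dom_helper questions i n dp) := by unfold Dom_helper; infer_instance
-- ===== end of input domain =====

-- B replaces A's top-down memoized recursion by a bottom-up tabulation loop (alternative decomposition).
-- Both versions mutate dp in place; the equivalence proved here is about the RETURN value only
-- (B fills every uncached cell in [i,n), A only the cells its recursion reaches).

-- ===== PORT A =====
-- State-passing transliteration of A's recursion; fuel only makes it total
-- (Pre_helper guarantees the fuel is never exhausted). (0, dp) on a raise is unreachable under Pre_.
def helperA (fuel : Nat) (questions : List (List Int)) (i : Int) (n : Int) (dp : List Int) : Int × List Int :=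
  match fuel with
  | 0 => (0, dp)
  | fuel + 1 =>
    if n ≤ i then (0, dp)
    else
      let di := PySem.List.pyGetD dp i 0        -- dp[i]; in range under Pre_
      if di ≠ -1 then (di, dp)
      else
        let q := PySem.List.pyGetD questions i []    -- questions[i]; in range under Pre_
        let r1 := helperA fuel questions (i + PySem.List.pyGetD q 1 0 + 1) n dp
        let pick := r1.1 + PySem.List.pyGetD q 0 0
        let r2 := helperA fuel questions (i + 1) n r1.2
        let dp3 := PySem.List.pySetD r2.2 i (max pick r2.1)
        (PySem.List.pyGetD dp3 i 0, dp3)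

def helper (questions : List (List Int)) (i : Int) (n : Int) (dp : List Int) : Int :=
  (helperA ((n - i).toNat + 1) questions i n dp).1

-- ===== PORT B =====
-- loop body: one iteration of B's for-loop at index j
def bodyB (questions : List (List Int)) (n : Int) (dp : List Int) (j : Int) : List Int :=
  if PySem.List.pyGetD dp j 0 = -1 then
    let q := PySem.List.pyGetD questions j []
    let nxt := j + PySem.List.pyGetD q 1 0 + 1
    let pick := PySem.List.pyGetD q 0 0 + (if nxt < n then PySem.List.pyGetD dp nxt 0 else 0)
    let skip := if j + 1 < n then PySem.List.pyGetD dp (j + 1) 0 else 0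
    PySem.List.pySetD dp j (max pick skip)
  else dp

def helper_alt (questions : List (List Int)) (i : Int) (n : Int) (dp : List Int) : Int :=
  if n ≤ i then 0
  else
    let dp' := (PySem.List.pyRange (n - 1) (i - 1) (-1)).foldl (bodyB questions n) dp
    PySem.List.pyGetD dp' i 0

-- ===== PRECONDITION & SPEC =====
-- Pre_ excludes calls on which A raises (IndexError on short rows / too-short lists) or diverges
-- (negative jump lengths), keyed to the cells k∈[i,n) the cache guard dp[k]==-1 leaves active, and
-- calls with negative i below n, where CPython's negative-index wraparound aliases dp cells and A's
-- value is an accident of evaluation order. (Slight narrowing: a bad but unreachable active cell is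
-- also excluded even though A would return — reachability is not closed-form.)
def Pre_helper (questions : List (List Int)) (i : Int) (n : Int) (dp : List Int) : Prop :=
  n ≤ i ∨ (0 ≤ i ∧ n ≤ (dp.length : Int) ∧ n ≤ (questions.length : Int) ∧
    ∀ k : Nat, k < questions.length →
      (i ≤ (k : Int) ∧ (k : Int) < n ∧ dp.getD k 0 = -1) →
        2 ≤ (questions.getD k []).length ∧ 0 ≤ (questions.getD k []).getD 1 0)
instance (questions : List (List Int)) (i : Int) (n : Int) (dp : List Int) : Decidable (Pre_helper questions i n dp) := by unfold Pre_helper; infer_instance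

def pvWitness_helper : List (List Int) × Int × Int × List Int :=
  ([[3, 2], [4, 3], [4, 4], [2, 2], [5, 0]], 0, 5, [-1, -1, -1, -1, -1])

def Spec_helper (questions : List (List Int)) (i : Int) (n : Int) (dp : List Int) (out : Int) : Prop := out = helper_alt questions i n dp
instance (questions : List (List Int)) (i : Int) (n : Int) (dp : List Int) (out : Int) : Decidable (Spec_helper questions i n dp out) := by unfold Spec_helper; infer_instance

-- ===== CLAIM (what is proved, stated in full; the proofs are below) =====
def Claim_equal_helper : Prop := ∀ (questions : List (List Int)) (i : Int) (n : Int) (dp : List Int), Dom_helper questions i n dp → Pre_helper questions i n dp → Spec_helper questions i n dp (helper questions i n dp)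

-- ===== LEMMAS AND PROOFS =====

-- The common value function: the memo-respecting optimum of suffix j w.r.t. the ORIGINAL dp0.
-- (Proof-only helper; the inner max on the jump target makes it well-founded, and under Pre_
-- the jump length is nonnegative so the max is the real target.)
def Vval (questions : List (List Int)) (n : Int) (dp0 : List Int) (j : Int) : Int :=
  if _h : n ≤ j then 0
  else if dp0.getD j.toNat 0 = -1 then
    max ((questions.getD j.toNat []).getD 0 0 +
          Vval questions n dp0 (max (j + 1) (j + (questions.getD j.toNat []).getD 1 0 + 1)))
        (Vval questions n dp0 (j + 1))
  else dp0.getD j.toNat 0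
termination_by (n - j).toNat
decreasing_by all_goals omega


-- small bridges between PySem indexing and List.getD
lemma pyGetD_getD (xs : List Int) (i : Int) (d : Int) (h0 : 0 ≤ i) (h1 : i < (xs.length : Int)) :
    PySem.List.pyGetD xs i d = xs.getD i.toNat d := by
  rw [PySem.List.pyGetD_eq_getElem xs d h0 h1]
  exact (List.getD_eq_getElem xs d (by omega)).symm

lemma pyGetD_getD' (xs : List (List Int)) (i : Int) (h0 : 0 ≤ i) (h1 : i < (xs.length : Int)) :
    PySem.List.pyGetD xs i [] = xs.getD i.toNat [] := by
  rw [PySem.List.pyGetD_eq_getElem xs [] h0 h1]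
  exact (List.getD_eq_getElem xs [] (by omega)).symm

lemma pyGetD_one (xs : List Int) (d : Int) : PySem.List.pyGetD xs 1 d = xs.getD 1 d := by
  rw [show (1 : Int) = ((1 : Nat) : Int) by norm_num, PySem.List.pyGetD_natCast]

lemma pyGetD_zero' (xs : List Int) (d : Int) : PySem.List.pyGetD xs 0 d = xs.getD 0 d := by
  rw [show (0 : Int) = ((0 : Nat) : Int) by norm_num, PySem.List.pyGetD_natCast]

lemma getD_set_self (l : List Int) (k : Nat) (v d : Int) (h : k < l.length) :
    (l.set k v).getD k d = v := by
  simp [List.getD, h]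

lemma getD_set_ne (l : List Int) (k m : Nat) (v d : Int) (h : k ≠ m) :
    (l.set k v).getD m d = l.getD m d := by
  simp [List.getD, h]

-- Vval unfoldings
lemma Vval_of_ge (questions : List (List Int)) (n : Int) (dp0 : List Int) (j : Int) (h : n ≤ j) :
    Vval questions n dp0 j = 0 := by rw [Vval, dif_pos h]

lemma Vval_of_cached (questions : List (List Int)) (n : Int) (dp0 : List Int) (j : Int)
    (h1 : ¬ n ≤ j) (h2 : dp0.getD j.toNat 0 ≠ -1) :
    Vval questions n dp0 j = dp0.getD j.toNat 0 := by rw [Vval, dif_neg h1, if_neg h2]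

lemma Vval_of_uncached (questions : List (List Int)) (n : Int) (dp0 : List Int) (j : Int)
    (h1 : ¬ n ≤ j) (h2 : dp0.getD j.toNat 0 = -1) :
    Vval questions n dp0 j =
      max ((questions.getD j.toNat []).getD 0 0 +
            Vval questions n dp0 (max (j + 1) (j + (questions.getD j.toNat []).getD 1 0 + 1)))
          (Vval questions n dp0 (j + 1)) := by
  rw [Vval, dif_neg h1, if_pos h2]

-- invariant of A's recursion: each cell is still the original one, or the memo value
def InvA (questions : List (List Int)) (n : Int) (dp0 dp : List Int) : Prop :=
  dp.length = dp0.length ∧ ∀ k : Nat, k < dp.length →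
    dp.getD k 0 = dp0.getD k 0 ∨ (dp0.getD k 0 = -1 ∧ dp.getD k 0 = Vval questions n dp0 (k : Int))

lemma A_run (questions : List (List Int)) (n i0 : Int) (dp0 : List Int)
    (hd : n ≤ (dp0.length : Int)) (hq : n ≤ (questions.length : Int))
    (hAll : ∀ k : Nat, k < questions.length →
      (i0 ≤ (k : Int) ∧ (k : Int) < n ∧ dp0.getD k 0 = -1) →
      2 ≤ (questions.getD k []).length ∧ 0 ≤ (questions.getD k []).getD 1 0) :
    ∀ (fuel : Nat) (i : Int) (dp : List Int), i0 ≤ i → 0 ≤ i → (n - i).toNat < fuel →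
      InvA questions n dp0 dp →
      (helperA fuel questions i n dp).1 = Vval questions n dp0 i ∧
      InvA questions n dp0 (helperA fuel questions i n dp).2 := by
  intro fuel
  induction fuel with
  | zero => intro i dp _ _ h _; omega
  | succ fuel ih =>
    intro i dp hi0 hi hfuel hInv
    have hlen : dp.length = dp0.length := hInv.1
    by_cases hge : n ≤ i
    · refine ⟨?_, ?_⟩
      · simp only [helperA, if_pos hge]; rw [Vval_of_ge _ _ _ _ hge]
      · simp only [helperA, if_pos hge]; exact hInv
    · have hilt : i < n := by omega
      have hik : i.toNat < dp.length := by omega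
      have hdpi : PySem.List.pyGetD dp i 0 = dp.getD i.toNat 0 :=
        pyGetD_getD dp i 0 hi (by omega)
      by_cases hc : dp.getD i.toNat 0 = -1
      · -- uncached: recurse
        have hd0 : dp0.getD i.toNat 0 = -1 := by
          rcases hInv.2 i.toNat hik with h | h
          · rw [← h]; exact hc
          · exact h.1
        have hikq : i.toNat < questions.length := by omega
        obtain ⟨hq2, hq1⟩ := hAll i.toNat hikq ⟨by omega, by omega, hd0⟩
        have hqq : PySem.List.pyGetD questions i [] = questions.getD i.toNat [] :=
          pyGetD_getD' questions i hi (by omega)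
        set q := questions.getD i.toNat [] with hqdef
        have hg1 : PySem.List.pyGetD q 1 0 = q.getD 1 0 := pyGetD_one q 0
        have hg0 : PySem.List.pyGetD q 0 0 = q.getD 0 0 := pyGetD_zero' q 0
        obtain ⟨hA1, hInv1⟩ := ih (i + q.getD 1 0 + 1) dp (by omega) (by omega) (by omega) hInv
        set r1 := helperA fuel questions (i + q.getD 1 0 + 1) n dp with hr1
        obtain ⟨hA2, hInv2⟩ := ih (i + 1) r1.2 (by omega) (by omega) (by omega) hInv1
        set r2 := helperA fuel questions (i + 1) n r1.2 with hr2
        have hlen2 : r2.2.length = dp0.length := hInv2.1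
        set v := max (r1.1 + q.getD 0 0) r2.1 with hv
        have hset : PySem.List.pySetD r2.2 i v = r2.2.set i.toNat v :=
          PySem.List.pySetD_of_nonneg r2.2 v hi
        have hlen3 : (r2.2.set i.toNat v).length = dp0.length := by
          rw [List.length_set]; exact hlen2
        have hread : PySem.List.pyGetD (r2.2.set i.toNat v) i 0 = v := by
          rw [pyGetD_getD _ i 0 hi (by rw [hlen3]; omega)]
          exact getD_set_self _ _ _ _ (by omega)
        have hVv : v = Vval questions n dp0 i := by
          rw [Vval_of_uncached questions n dp0 i hge hd0, ← hqdef,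
            max_eq_right (by omega : i + 1 ≤ i + q.getD 1 0 + 1), hv, hA1, hA2, add_comm]
        have hcast : ((i.toNat : Int)) = i := Int.toNat_of_nonneg hi
        have hstep : helperA (fuel + 1) questions i n dp =
            (v, r2.2.set i.toNat v) := by
          simp only [helperA, if_neg hge, hdpi, hqq, hg1, hg0]
          rw [if_neg (not_not_intro hc)]
          simp only [← hr1, ← hr2, ← hv, hset, hread]
        rw [hstep]
        refine ⟨?_, ?_⟩
        · show v = Vval questions n dp0 i
          exact hVv
        show InvA questions n dp0 (r2.2.set i.toNat v)
        refine ⟨hlen3, fun k hk => ?_⟩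
        rw [List.length_set] at hk
        by_cases hki : k = i.toNat
        · subst hki
          refine Or.inr ⟨hd0, ?_⟩
          rw [getD_set_self _ _ _ _ (by omega), hcast]
          exact hVv
        · rw [getD_set_ne _ _ _ _ _ (fun h => hki h.symm)]
          exact hInv2.2 k (by omega)
      · -- cached: return dp[i]
        have hcast : ((i.toNat : Int)) = i := Int.toNat_of_nonneg hi
        have hstep : helperA (fuel + 1) questions i n dp = (dp.getD i.toNat 0, dp) := by
          simp only [helperA, if_neg hge, hdpi]
          rw [if_pos hc]
        rw [hstep]
        refine ⟨?_, hInv⟩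
        show dp.getD i.toNat 0 = Vval questions n dp0 i
        rcases hInv.2 i.toNat hik with h | h
        · rw [h, Vval_of_cached questions n dp0 i hge (by rw [← h]; exact hc)]
        · rw [h.2, hcast]
  
-- invariant of B's loop: cells above the boundary are tabulated, the rest untouched
def InvB (questions : List (List Int)) (n : Int) (dp0 : List Int) (b : Int) (dp : List Int) : Prop :=
  dp.length = dp0.length ∧ ∀ k : Nat, k < dp.length →
    ((b < (k : Int) ∧ (k : Int) < n) → dp.getD k 0 = Vval questions n dp0 (k : Int)) ∧
    (¬ (b < (k : Int) ∧ (k : Int) < n) → dp.getD k 0 = dp0.getD k 0)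

lemma B_step (questions : List (List Int)) (n i0 : Int) (dp0 : List Int)
    (hd : n ≤ (dp0.length : Int)) (hq : n ≤ (questions.length : Int))
    (hAll : ∀ k : Nat, k < questions.length →
      (i0 ≤ (k : Int) ∧ (k : Int) < n ∧ dp0.getD k 0 = -1) →
      2 ≤ (questions.getD k []).length ∧ 0 ≤ (questions.getD k []).getD 1 0)
    (j : Int) (dp : List Int) (hj0 : 0 ≤ j) (hij : i0 ≤ j) (hjn : j < n)
    (hInv : InvB questions n dp0 j dp) :
    InvB questions n dp0 (j - 1) (bodyB questions n dp j) := by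
  have hlen : dp.length = dp0.length := hInv.1
  have hjk : j.toNat < dp.length := by omega
  have hdpj : PySem.List.pyGetD dp j 0 = dp.getD j.toNat 0 :=
    pyGetD_getD dp j 0 hj0 (by omega)
  have huntouched : dp.getD j.toNat 0 = dp0.getD j.toNat 0 :=
    (hInv.2 j.toNat hjk).2 (by omega)
  by_cases hc : dp.getD j.toNat 0 = -1
  · -- uncached cell: tabulate it
    have hd0 : dp0.getD j.toNat 0 = -1 := by rw [← huntouched]; exact hc
    obtain ⟨hq2, hq1⟩ := hAll j.toNat (by omega) ⟨by omega, by omega, hd0⟩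
    have hqq : PySem.List.pyGetD questions j [] = questions.getD j.toNat [] :=
      pyGetD_getD' questions j hj0 (by omega)
    set q := questions.getD j.toNat [] with hqdef
    have hg1 : PySem.List.pyGetD q 1 0 = q.getD 1 0 := pyGetD_one q 0
    have hg0 : PySem.List.pyGetD q 0 0 = q.getD 0 0 := pyGetD_zero' q 0
    set nxt := j + q.getD 1 0 + 1 with hnxt
    have hpick : (if nxt < n then PySem.List.pyGetD dp nxt 0 else 0)
        = Vval questions n dp0 nxt := by
      by_cases hlt : nxt < n
      · rw [if_pos hlt, pyGetD_getD dp nxt 0 (by omega) (by omega)]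
        have := (hInv.2 nxt.toNat (by omega)).1 (by omega)
        rw [this]; congr 1; omega
      · rw [if_neg hlt, Vval_of_ge questions n dp0 nxt (by omega)]
    have hskip : (if j + 1 < n then PySem.List.pyGetD dp (j + 1) 0 else 0)
        = Vval questions n dp0 (j + 1) := by
      by_cases hlt : j + 1 < n
      · rw [if_pos hlt, pyGetD_getD dp (j + 1) 0 (by omega) (by omega)]
        have := (hInv.2 (j + 1).toNat (by omega)).1 (by omega)
        rw [this]; congr 1; omega
      · rw [if_neg hlt, Vval_of_ge questions n dp0 (j + 1) (by omega)]
    set v := max (q.getD 0 0 + Vval questions n dp0 nxt) (Vval questions n dp0 (j + 1)) with hv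
    have hVv : v = Vval questions n dp0 j := by
      rw [Vval_of_uncached questions n dp0 j (by omega) hd0, ← hqdef,
        max_eq_right (by omega : j + 1 ≤ j + q.getD 1 0 + 1)]
    have hbody : bodyB questions n dp j = dp.set j.toNat v := by
      unfold bodyB
      rw [if_pos (by rw [hdpj]; exact hc)]
      simp only [hqq, hg1, hg0, ← hnxt, hpick, hskip, ← hv]
      exact PySem.List.pySetD_of_nonneg dp v hj0
    rw [hbody]
    refine ⟨by rw [List.length_set]; exact hlen, fun k hk => ?_⟩
    rw [List.length_set] at hk
    by_cases hkj : k = j.toNat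
    · subst hkj
      refine ⟨fun _ => ?_, fun habs => absurd ⟨by omega, by omega⟩ habs⟩
      rw [getD_set_self _ _ _ _ (by omega), hVv]; congr 1; omega
    · rw [getD_set_ne _ _ _ _ _ (fun h => hkj h.symm)]
      refine ⟨fun hcond => ?_, fun hcond => ?_⟩
      · exact (hInv.2 k hk).1 (by omega)
      · exact (hInv.2 k hk).2 (by omega)
  · -- cached cell: loop body does nothing
    have hbody : bodyB questions n dp j = dp := by
      unfold bodyB; rw [if_neg (by rw [hdpj]; exact hc)]
    rw [hbody]
    refine ⟨hlen, fun k hk => ⟨fun hcond => ?_, fun hcond => (hInv.2 k hk).2 (by omega)⟩⟩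
    by_cases hkj : k = j.toNat
    · subst hkj
      rw [huntouched,
        Vval_of_cached questions n dp0 (j.toNat : Int) (by omega)
          (by rw [Int.toNat_natCast]; rw [← huntouched]; exact hc), Int.toNat_natCast]
    · exact (hInv.2 k hk).1 (by omega)

lemma B_loop (questions : List (List Int)) (n i0 : Int) (dp0 : List Int)
    (hd : n ≤ (dp0.length : Int)) (hq : n ≤ (questions.length : Int))
    (hAll : ∀ k : Nat, k < questions.length →
      (i0 ≤ (k : Int) ∧ (k : Int) < n ∧ dp0.getD k 0 = -1) →
      2 ≤ (questions.getD k []).length ∧ 0 ≤ (questions.getD k []).getD 1 0) :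
    ∀ (m : Nat) (j l : Int) (dp : List Int), j < n → -1 ≤ l → i0 - 1 ≤ l → l ≤ j →
      (j - l).toNat = m → InvB questions n dp0 j dp →
      InvB questions n dp0 l ((PySem.List.pyRange j l (-1)).foldl (bodyB questions n) dp) := by
  intro m
  induction m with
  | zero =>
    intro j l dp hjn h1 h2 hlj hm hInv
    have hj : j = l := by omega
    subst hj
    rw [PySem.List.pyRange_neg_one_eq_nil le_rfl]
    exact hInv
  | succ m ih =>
    intro j l dp hjn h1 h2 hlj hm hInv
    have hlt : l < j := by omega
    rw [PySem.List.pyRange_neg_one_cons hlt]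
    simp only [List.foldl_cons]
    exact ih (j - 1) l (bodyB questions n dp j) (by omega) h1 h2 (by omega) (by omega)
      (B_step questions n i0 dp0 hd hq hAll j dp (by omega) (by omega) hjn hInv)

-- ===== VERDICT =====
theorem helper_spec : Claim_equal_helper := by
  intro questions i n dp _ hPre
  unfold Spec_helper helper helper_alt
  by_cases hge : n ≤ i
  · rw [if_pos hge]
    simp only [helperA, if_pos hge]
  · obtain ⟨hi, hd, hq, hAll⟩ := hPre.resolve_left hge
    have hInvA0 : InvA questions n dp dp := ⟨rfl, fun k _ => Or.inl rfl⟩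
    obtain ⟨hA, -⟩ := A_run questions n i dp hd hq hAll ((n - i).toNat + 1) i dp le_rfl hi
      (by omega) hInvA0
    have hInvB0 : InvB questions n dp (n - 1) dp :=
      ⟨rfl, fun k hk => ⟨fun h => absurd h (by omega), fun _ => rfl⟩⟩
    have hB := B_loop questions n i dp hd hq hAll ((n - 1) - (i - 1)).toNat (n - 1) (i - 1) dp
      (by omega) (by omega) (by omega) (by omega) rfl hInvB0
    set dp' := (PySem.List.pyRange (n - 1) (i - 1) (-1)).foldl (bodyB questions n) dp with hdp'
    rw [if_neg hge, hA]
    have hlen' : dp'.length = dp.length := hB.1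
    rw [pyGetD_getD dp' i 0 hi (by omega)]
    have := (hB.2 i.toNat (by omega)).1 (by omega)
    rw [this]
    congr 1; omega
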